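-- pv_equiv track=rewrite | github.com/emiliannn/Recipes-Recommendation-System | Backend/flask_app/app/configuration/paralel_computing_recommendations.py | calculate_index_ranges
-- ===== SOURCE A (Python) =====
-- def calculate_index_ranges(total_items, num_workers):
--     chunk_size = total_items // num_workers
--     remainder = total_items % num_workers
--
--     index_ranges = []
--     start_index = 0
--     for worker_id in range(num_workers):
--         end_index = start_index + chunk_size - 1 + (1 if worker_id < remainder else 0)
--         if worker_id == num_workers - 1:
--             end_index = total_items - 1
--         index_ranges.append((start_index, end_index))
--         start_index = end_index + 1
--
--     return index_ranges
-- ===== SOURCE B (Python) =====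
-- def calculate_index_ranges(total_items, num_workers):
--     chunk_size, remainder = divmod(total_items, num_workers)
--     bounds = [w * chunk_size + min(w, remainder) for w in range(num_workers + 1)]
--     return [(s, e - 1) for s, e in zip(bounds, bounds[1:])]
-- ===== Notes on version B (the rewrite author's own statement) =====
-- stated objective: alternative
-- what changed: B computes the list of chunk boundary points in one closed-form pass (bounds[w] = w*chunk + min(w, remainder)) and then zips consecutive boundaries into (start, next_boundary - 1) ranges, instead of A's single loop threading a start_index accumulator with a special-case override for the last worker.
-- outside the precondition, e.g. on calculate_index_ranges(10, 0): A raises ZeroDivisionError, B raises ZeroDivisionError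
import Mathlib
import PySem

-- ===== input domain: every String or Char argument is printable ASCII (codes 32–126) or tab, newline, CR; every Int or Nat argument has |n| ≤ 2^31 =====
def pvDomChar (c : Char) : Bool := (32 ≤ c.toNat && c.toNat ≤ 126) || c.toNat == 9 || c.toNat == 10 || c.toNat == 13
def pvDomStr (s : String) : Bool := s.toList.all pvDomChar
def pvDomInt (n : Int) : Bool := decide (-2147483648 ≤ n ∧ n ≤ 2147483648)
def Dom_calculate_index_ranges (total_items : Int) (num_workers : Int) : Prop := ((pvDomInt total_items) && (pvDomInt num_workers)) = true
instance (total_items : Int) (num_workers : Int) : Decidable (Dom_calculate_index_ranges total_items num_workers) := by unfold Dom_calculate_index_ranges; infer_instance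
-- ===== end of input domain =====

-- B builds the chunk boundary points by closed form in one pass and zips consecutive boundaries
-- into ranges, replacing A's accumulator loop with its last-worker override (objective: alternative).

-- ===== PORT A =====
-- accumulator loop: carries (index_ranges, start_index); last worker's end overridden to total_items - 1
def calculate_index_ranges (total_items : Int) (num_workers : Int) : List (Int × Int) :=
  let chunk_size := PySem.Int.floordiv total_items num_workers
  let remainder := PySem.Int.mod total_items num_workers
  let st := (PySem.List.pyRange 0 num_workers 1).foldl
    (fun (st : List (Int × Int) × Int) (worker_id : Int) =>
      let end_index := st.2 + chunk_size - 1 + (if worker_id < remainder then 1 else 0)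
      let end_index := if worker_id = num_workers - 1 then total_items - 1 else end_index
      (st.1 ++ [(st.2, end_index)], end_index + 1))
    ([], 0)
  st.1

-- ===== PORT B =====
-- staged: boundary list by closed form, then zip consecutive boundaries into (start, next - 1)
def calculate_index_ranges_alt (total_items : Int) (num_workers : Int) : List (Int × Int) :=
  match PySem.Int.divmod? total_items num_workers with
  | none => []   -- num_workers = 0: Python raises ZeroDivisionError (outside Pre_)
  | some (chunk_size, remainder) =>
    let bounds := (PySem.List.pyRange 0 (num_workers + 1) 1).map
      (fun w => w * chunk_size + min w remainder)
    (bounds.zip bounds.tail).map (fun p => (p.1, p.2 - 1))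

-- ===== PRECONDITION & SPEC =====
-- Pre_ excludes num_workers = 0, on which A raises ZeroDivisionError (B raises too).
def Pre_calculate_index_ranges (total_items : Int) (num_workers : Int) : Prop := num_workers ≠ 0
instance (total_items : Int) (num_workers : Int) : Decidable (Pre_calculate_index_ranges total_items num_workers) := by unfold Pre_calculate_index_ranges; infer_instance
def pvWitness_calculate_index_ranges : Int × Int := (10, 3)

def Spec_calculate_index_ranges (total_items : Int) (num_workers : Int) (out : List (Int × Int)) : Prop := out = calculate_index_ranges_alt total_items num_workers
instance (total_items : Int) (num_workers : Int) (out : List (Int × Int)) : Decidable (Spec_calculate_index_ranges total_items num_workers out) := by unfold Spec_calculate_index_ranges; infer_instance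

-- ===== CLAIM (what is proved, stated in full; the proofs are below) =====
def Claim_equal_calculate_index_ranges : Prop := ∀ (total_items : Int) (num_workers : Int), Dom_calculate_index_ranges total_items num_workers → Pre_calculate_index_ranges total_items num_workers → Spec_calculate_index_ranges total_items num_workers (calculate_index_ranges total_items num_workers)

-- ===== LEMMAS AND PROOFS =====

-- the shared closed form: boundary point of worker w
def pvBound (t n w : Int) : Int := w * PySem.Int.floordiv t n + min w (PySem.Int.mod t n)

-- zipping a mapped range with its own tail yields the consecutive pairs
theorem pv_zip_tail (g : Nat → Int) (m : Nat) :
    ((List.range (m + 1)).map g).zip (((List.range (m + 1)).map g).tail)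
      = (List.range m).map (fun k => (g k, g (k + 1))) := by
  apply List.ext_getElem
  · simp
  · intro k h1 h2
    have hk : k < m := by simpa using h2
    simp [List.getElem_zip, List.getElem_tail]

-- loop invariant for A: after m iterations the accumulator is the closed-form pair list
-- and start_index is the m-th boundary point
theorem pv_loop_inv (t n : Int) (hn : 0 < n) (m : Nat) (hm : (m : Int) ≤ n) :
    (PySem.List.pyRange 0 (m : Int) 1).foldl
      (fun (st : List (Int × Int) × Int) (worker_id : Int) =>
        let end_index := st.2 + PySem.Int.floordiv t n - 1 + (if worker_id < PySem.Int.mod t n then 1 else 0)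
        let end_index := if worker_id = n - 1 then t - 1 else end_index
        (st.1 ++ [(st.2, end_index)], end_index + 1))
      ([], 0)
    = ((List.range m).map (fun k : Nat => (pvBound t n (k : Int), pvBound t n ((k : Int) + 1) - 1)), pvBound t n (m : Int)) := by
  have hr0 : 0 ≤ PySem.Int.mod t n := PySem.Int.mod_nonneg t hn
  have hrn : PySem.Int.mod t n < n := PySem.Int.mod_lt t hn
  have hid : PySem.Int.floordiv t n * n + PySem.Int.mod t n = t := PySem.Int.floordiv_mul_add_mod t n
  induction m with
  | zero => simp [pvBound]; omega
  | succ k ih =>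
    have hk : (k : Int) ≤ n := by push_cast at hm ⊢; omega
    have hsplit : PySem.List.pyRange 0 ((k : Int) + 1) 1
        = PySem.List.pyRange 0 (k : Int) 1 ++ [(k : Int)] :=
      PySem.List.pyRange_one_succ_right (by positivity)
    push_cast
    rw [hsplit, List.foldl_append, ih hk, List.range_succ, List.map_append]
    simp only [List.foldl_cons, List.foldl_nil, List.map_cons, List.map_nil]
    have hend : pvBound t n ((k : Int) + 1) - 1
        = pvBound t n k + PySem.Int.floordiv t n - 1 + (if (k : Int) < PySem.Int.mod t n then 1 else 0) := by
      unfold pvBound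
      split_ifs with h
      · have : min ((k:Int) + 1) (PySem.Int.mod t n) = min (k:Int) (PySem.Int.mod t n) + 1 := by omega
        rw [this]; ring
      · have : min ((k:Int) + 1) (PySem.Int.mod t n) = min (k:Int) (PySem.Int.mod t n) := by omega
        rw [this]; ring
    by_cases hlast : (k : Int) = n - 1
    · have hlastval : pvBound t n ((k : Int) + 1) - 1 = t - 1 := by
        unfold pvBound
        have hmin : min ((k:Int) + 1) (PySem.Int.mod t n) = PySem.Int.mod t n := by omega
        rw [hmin, hlast]; linear_combination hid
      rw [if_pos hlast, Prod.mk.injEq]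
      exact ⟨by rw [← hlastval], by rw [← hlastval]; ring⟩
    · rw [if_neg hlast, Prod.mk.injEq]
      exact ⟨by rw [← hend], by rw [← hend]; ring⟩

-- B's zip-of-boundaries equals the same closed-form pair list
theorem pv_alt_eq (t n : Int) (hn : 0 < n) :
    calculate_index_ranges_alt t n
      = (List.range n.toNat).map (fun k : Nat => (pvBound t n (k : Int), pvBound t n ((k : Int) + 1) - 1)) := by
  unfold calculate_index_ranges_alt
  have hdm : PySem.Int.divmod? t n = some (PySem.Int.floordiv t n, PySem.Int.mod t n) := by
    simp [PySem.Int.divmod?, PySem.Int.floordiv, PySem.Int.mod, hn.ne']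
  rw [hdm]
  have hrange : PySem.List.pyRange 0 (n + 1) 1
      = (List.range (n.toNat + 1)).map (fun k => ((k : Nat) : Int)) := by
    rw [PySem.List.pyRange_one]
    have : (n + 1 - 0).toNat = n.toNat + 1 := by omega
    rw [this]
    simp
  simp only [hrange, List.map_map]
  have hcomp : (fun w => w * PySem.Int.floordiv t n + min w (PySem.Int.mod t n)) ∘ (fun k : Nat => ((k : Nat) : Int))
      = fun k : Nat => pvBound t n ((k : Nat) : Int) := by
    funext k; simp [pvBound]
  rw [hcomp, pv_zip_tail (fun k : Nat => pvBound t n ((k : Nat) : Int)) n.toNat, List.map_map]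
  apply List.map_congr_left
  intro k _
  simp only [Function.comp]
  push_cast
  rfl

-- ===== VERDICT (by name: the statement is the Claim_ definition above) =====
theorem calculate_index_ranges_spec : Claim_equal_calculate_index_ranges := by
  intro t n _ hpre
  unfold Spec_calculate_index_ranges
  rcases lt_or_gt_of_ne hpre with hneg | hpos
  · unfold calculate_index_ranges calculate_index_ranges_alt
    have hdm : PySem.Int.divmod? t n = some (PySem.Int.floordiv t n, PySem.Int.mod t n) := by
      simp [PySem.Int.divmod?, PySem.Int.floordiv, PySem.Int.mod]
      omega
    rw [hdm]
    rw [PySem.List.pyRange_one_eq_nil (le_of_lt hneg),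
        PySem.List.pyRange_one_eq_nil (by omega : n + 1 ≤ 0)]
    simp
  · unfold calculate_index_ranges
    have h := congrArg Prod.fst (pv_loop_inv t n hpos n.toNat (by omega))
    have hn' : ((n.toNat : Nat) : Int) = n := by omega
    rw [hn'] at h
    rw [pv_alt_eq t n hpos]
    exact h
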